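-- pv_equiv track=rewrite | github.com/levi-sledd/presentations | presentations.py | nondecreasingPartitionsStartingWith
-- ===== SOURCE A (Python) =====
-- def nondecreasingPartitionsStartingWith(k, n):
--     partitions = []
--     if k == n:
--         partitions.append([n])
--     elif k < n:
--         for i in range(k, n-k+1):
--             for smallerPartition in nondecreasingPartitionsStartingWith(i, n-k):
--                 partitions.append([k] + smallerPartition)
--     return partitions
-- ===== SOURCE B (Python) =====
-- def nondecreasingPartitionsStartingWith(k, n):
--     # Bottom-up DP: F[(i, j)] = nondecreasing partitions of j with first part i
--     # (only parts >= k can occur), each subproblem computed once and reused.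
--     if k == n:
--         return [[n]]
--     if k >= n or k < 1:
--         return []
--     m = n - k
--     F = {}
--     for j in range(k, m + 1):
--         for i in range(k, j + 1):
--             if i == j:
--                 F[(i, j)] = [[j]]
--             else:
--                 F[(i, j)] = [[i] + p for t in range(i, j - i + 1) for p in F[(t, j - i)]]
--     return [[k] + p for i in range(k, m + 1) for p in F[(i, m)]]
-- ===== Notes on version B (the rewrite author's own statement) =====
-- stated objective: alternative
-- what changed: replaced A's naive recursion with an iterative bottom-up dynamic-programming table of subproblem partition lists (no recursion), from which the answer is assembled in one pass
import Mathlib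
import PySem

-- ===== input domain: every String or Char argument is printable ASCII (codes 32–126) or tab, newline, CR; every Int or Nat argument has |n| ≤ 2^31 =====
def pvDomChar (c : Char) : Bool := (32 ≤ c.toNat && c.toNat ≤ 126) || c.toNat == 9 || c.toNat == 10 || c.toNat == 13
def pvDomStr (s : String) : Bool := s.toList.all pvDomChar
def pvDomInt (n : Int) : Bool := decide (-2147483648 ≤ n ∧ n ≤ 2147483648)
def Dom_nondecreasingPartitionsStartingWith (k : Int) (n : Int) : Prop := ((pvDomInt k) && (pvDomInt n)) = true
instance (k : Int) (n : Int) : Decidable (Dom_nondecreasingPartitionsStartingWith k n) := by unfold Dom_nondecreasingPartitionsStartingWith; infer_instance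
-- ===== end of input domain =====

-- B replaces A's naive recursion by an iterative bottom-up DP table of subproblem
-- partition lists (objective: alternative structure; measured speed comparable).

-- ===== PORT A =====
-- Literal transliteration of A's recursion; the Nat fuel only makes it total.
-- Inside Pre_ the recursion depth is < n.toNat + 1 (each call strictly decreases n
-- while k ≥ 1), so the fuel never runs out on admitted inputs.
def fA : Nat → Int → Int → List (List Int)
  | 0, _, _ => []
  | (fuel+1), k, n =>
    if k = n then [[n]]
    else if k < n then
      (PySem.List.pyRange k (n-k+1) 1).foldl
        (fun partitions i =>
          (fA fuel i (n-k)).foldl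
            (fun ps smallerPartition => ps ++ [[k] ++ smallerPartition]) partitions) []
    else []

def nondecreasingPartitionsStartingWith (k : Int) (n : Int) : List (List Int) :=
  fA (n.toNat + 1) k n

-- ===== PORT B =====
-- B-side helpers: the DP-table loops of Source B (F[(i,j)] = partitions of j starting with i,
-- only parts ≥ c = k are ever needed).
def bInner (j : Int) (F : PySem.Dict (Int × Int) (List (List Int))) (i : Int) :
    PySem.Dict (Int × Int) (List (List Int)) :=
  if i = j then F.insert (i, j) [[j]]
  else F.insert (i, j)
    ((PySem.List.pyRange i (j-i+1) 1).flatMap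
      (fun t => (F.getD (t, j - i) []).map (fun p => [i] ++ p)))

def bOuter (c : Int) (F : PySem.Dict (Int × Int) (List (List Int))) (j : Int) :
    PySem.Dict (Int × Int) (List (List Int)) :=
  (PySem.List.pyRange c (j+1) 1).foldl (bInner j) F

def bBuild (c : Int) (m : Int) : PySem.Dict (Int × Int) (List (List Int)) :=
  (PySem.List.pyRange c (m+1) 1).foldl (bOuter c) PySem.Dict.empty

def nondecreasingPartitionsStartingWith_alt (k : Int) (n : Int) : List (List Int) :=
  if k = n then [[n]]
  else if k ≥ n ∨ k < 1 then []
  else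
    let m := n - k
    let F := bBuild k m
    (PySem.List.pyRange k (m+1) 1).flatMap
      (fun i => (F.getD (i, m) []).map (fun p => [k] ++ p))

-- ===== PRECONDITION & SPEC =====
-- Pre_ excludes exactly the inputs with k < n and k ≤ 0, on which A's recursion never
-- reaches a base case and raises RecursionError (it returns nothing there).
def Pre_nondecreasingPartitionsStartingWith (k : Int) (n : Int) : Prop :=
  k < n → 1 ≤ k
instance (k : Int) (n : Int) : Decidable (Pre_nondecreasingPartitionsStartingWith k n) := by
  unfold Pre_nondecreasingPartitionsStartingWith; infer_instance

def pvWitness_nondecreasingPartitionsStartingWith : Int × Int := (2, 9)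

def Spec_nondecreasingPartitionsStartingWith (k : Int) (n : Int) (out : List (List Int)) : Prop :=
  out = nondecreasingPartitionsStartingWith_alt k n
instance (k : Int) (n : Int) (out : List (List Int)) :
    Decidable (Spec_nondecreasingPartitionsStartingWith k n out) := by
  unfold Spec_nondecreasingPartitionsStartingWith; infer_instance

-- ===== CLAIM (what is proved, stated in full; the proofs are below) =====
def Claim_equal_nondecreasingPartitionsStartingWith : Prop :=
  ∀ (k : Int) (n : Int), Dom_nondecreasingPartitionsStartingWith k n →
    Pre_nondecreasingPartitionsStartingWith k n →
    Spec_nondecreasingPartitionsStartingWith k n (nondecreasingPartitionsStartingWith k n)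

-- ===== LEMMAS AND PROOFS =====

-- the value the table stores for key (i, j), computed from a dict d
def valB (d : PySem.Dict (Int × Int) (List (List Int))) (i j : Int) : List (List Int) :=
  (PySem.List.pyRange i (j-i+1) 1).flatMap
    (fun t => (d.getD (t, j - i) []).map (fun p => [i] ++ p))

def valOf (d : PySem.Dict (Int × Int) (List (List Int))) (i j : Int) : List (List Int) :=
  if i = j then [[j]] else valB d i j

lemma valB_congr {d d' : PySem.Dict (Int × Int) (List (List Int))} (i j : Int)
    (h : ∀ t : Int, d.getD (t, j - i) [] = d'.getD (t, j - i) []) :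
    valB d i j = valB d' i j := by
  unfold valB
  congr 1
  funext t
  rw [h t]

lemma bInner_eq (j : Int) (F : PySem.Dict (Int × Int) (List (List Int))) (i : Int) :
    bInner j F i = F.insert (i, j) (valOf F i j) := by
  unfold bInner valOf valB
  split_ifs <;> rfl

-- getD through the inner fold (the j-th outer iteration), lo ≥ 1
lemma getD_innerFold (j : Int) : ∀ (N : Nat) (lo : Int), (j + 1 - lo).toNat ≤ N → 1 ≤ lo →
    ∀ (d : PySem.Dict (Int × Int) (List (List Int))) (key : Int × Int),
    ((PySem.List.pyRange lo (j+1) 1).foldl (bInner j) d).getD key [] =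
      if lo ≤ key.1 ∧ key.1 ≤ j ∧ key.2 = j then valOf d key.1 j else d.getD key [] := by
  intro N
  induction N with
  | zero =>
    intro lo hN hlo d key
    rw [PySem.List.pyRange_one_eq_nil (by omega)]
    simp only [List.foldl_nil]
    rw [if_neg (by omega)]
  | succ N ih =>
    intro lo hN hlo d key
    by_cases hlt : lo < j + 1
    · rw [PySem.List.pyRange_one_cons hlt]
      simp only [List.foldl_cons]
      rw [ih (lo+1) (by omega) (by omega)]
      rw [bInner_eq]
      obtain ⟨a, b⟩ := key
      simp only at *
      by_cases h2 : b = j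
      · by_cases hk1 : a = lo
        · rw [if_neg (by omega), if_pos (by omega)]
          rw [show ((a, b) : Int × Int) = (lo, j) by rw [hk1, h2]]
          rw [PySem.Dict.getD_insert_self, hk1]
        · by_cases hrange : lo + 1 ≤ a ∧ a ≤ j
          · rw [if_pos (by omega), if_pos (by omega)]
            -- valOf of the extended dict agrees: queried keys have snd = j - a ≠ j
            unfold valOf
            by_cases hij : a = j
            · rw [if_pos hij, if_pos hij]
            · rw [if_neg hij, if_neg hij]
              apply valB_congr
              intro t
              apply PySem.Dict.getD_insert_of_ne
              intro hc
              have : j - a = j := congrArg Prod.snd hc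
              omega
          · rw [if_neg (by omega), if_neg (by omega)]
            apply PySem.Dict.getD_insert_of_ne
            intro hc
            have h1 : a = lo := congrArg Prod.fst hc
            omega
      · rw [if_neg (by omega), if_neg (by omega)]
        apply PySem.Dict.getD_insert_of_ne
        intro hc
        have : b = j := congrArg Prod.snd hc
        omega
    · rw [PySem.List.pyRange_one_eq_nil (by omega)]
      simp only [List.foldl_nil]
      rw [if_neg (by omega)]

lemma bBuild_succ (c m : Int) (h : c ≤ m) : bBuild c m = bOuter c (bBuild c (m-1)) m := by
  unfold bBuild
  have : PySem.List.pyRange c (m+1) 1 = PySem.List.pyRange c m 1 ++ [m] := by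
    have := PySem.List.pyRange_one_succ_right (a := c) (b := m) (by omega)
    simpa using this
  rw [this, List.foldl_append]
  simp [sub_add_cancel]

lemma bBuild_getD (c : Int) (hc : 1 ≤ c) : ∀ (N : Nat) (m : Int), m.toNat ≤ N →
    ∀ (key : Int × Int),
    (bBuild c m).getD key [] =
      if c ≤ key.1 ∧ key.1 ≤ key.2 ∧ key.2 ≤ m then valOf (bBuild c (key.2 - 1)) key.1 key.2
      else [] := by
  intro N
  induction N with
  | zero =>
    intro m hN key
    unfold bBuild
    rw [PySem.List.pyRange_one_eq_nil (by omega)]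
    simp only [List.foldl_nil, PySem.Dict.getD_empty]
    rw [if_neg (by omega)]
  | succ N ih =>
    intro m hN key
    by_cases hm : c ≤ m
    · rw [bBuild_succ c m hm]
      unfold bOuter
      rw [getD_innerFold m (m.toNat) c (by omega) (by omega)]
      obtain ⟨a, b⟩ := key
      simp only at *
      by_cases h2 : b = m
      · by_cases hr : c ≤ a ∧ a ≤ m
        · rw [if_pos (by omega), if_pos (by omega), h2]
        · rw [if_neg (by omega), if_neg (by omega)]
          rw [ih (m-1) (by omega) (a, b)]
          rw [if_neg (by omega)]
      · rw [if_neg (by omega)]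
        rw [ih (m-1) (by omega) (a, b)]
        simp only
        by_cases hcc : c ≤ a ∧ a ≤ b ∧ b ≤ m - 1
        · rw [if_pos hcc, if_pos (by omega)]
        · rw [if_neg hcc, if_neg (by omega)]
    · unfold bBuild
      rw [PySem.List.pyRange_one_eq_nil (by omega)]
      simp only [List.foldl_nil, PySem.Dict.getD_empty]
      rw [if_neg (by omega)]

-- the inner append-loop of A is a map, and the outer loop a flatMap
lemma fA_flat (fuel : Nat) (k n : Int) (h1 : k < n) :
    fA (fuel+1) k n =
      (PySem.List.pyRange k (n-k+1) 1).flatMap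
        (fun i => (fA fuel i (n-k)).map (fun p => [k] ++ p)) := by
  show (if k = n then [[n]] else if k < n then _ else _) = _
  rw [if_neg (by omega), if_pos h1]
  have hstep : ∀ (acc : List (List Int)) (i : Int),
      (fA fuel i (n-k)).foldl (fun ps sp => ps ++ [[k] ++ sp]) acc =
      acc ++ (fA fuel i (n-k)).map (fun p => [k] ++ p) := by
    intro acc i
    exact PySem.List.foldl_append_singleton_eq_map _ _ _
  calc (PySem.List.pyRange k (n-k+1) 1).foldl
        (fun partitions i =>
          (fA fuel i (n-k)).foldl (fun ps sp => ps ++ [[k] ++ sp]) partitions) []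
      = (PySem.List.pyRange k (n-k+1) 1).foldl
        (fun partitions i => partitions ++ (fA fuel i (n-k)).map (fun p => [k] ++ p)) [] := by
        apply List.foldl_ext
        intro acc i _
        exact hstep acc i
    _ = _ := by
        rw [PySem.List.foldl_append_eq_flatMap]
        simp

-- main bridge: A's fuelled recursion computes exactly the DP-table entry
lemma fA_eq_table (c : Int) (hc : 1 ≤ c) : ∀ (N : Nat) (j : Int), j.toNat ≤ N →
    ∀ (fuel : Nat) (i : Int), c ≤ i → j.toNat < fuel →
    fA fuel i j = (bBuild c j).getD (i, j) [] := by
  intro N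
  induction N with
  | zero =>
    intro j hN fuel i hi hfuel
    obtain ⟨f, rfl⟩ : ∃ f, fuel = f + 1 := ⟨fuel - 1, by omega⟩
    show (if i = j then [[j]] else if i < j then _ else _) = _
    rw [if_neg (by omega), if_neg (by omega)]
    rw [bBuild_getD c hc j.toNat j le_rfl]
    rw [if_neg (by omega)]
  | succ N ih =>
    intro j hN fuel i hi hfuel
    obtain ⟨f, rfl⟩ : ∃ f, fuel = f + 1 := ⟨fuel - 1, by omega⟩
    rw [bBuild_getD c hc (j.toNat) j le_rfl]
    by_cases hij : i = j
    · subst hij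
      rw [if_pos (by omega)]
      show (if i = i then [[i]] else _) = _
      rw [if_pos rfl]
      unfold valOf
      rw [if_pos rfl]
    · by_cases hlt : i < j
      · rw [if_pos (by omega)]
        rw [fA_flat f i j hlt]
        unfold valOf
        rw [if_neg hij]
        unfold valB
        apply List.flatMap_congr
        intro t ht
        have htr := (PySem.List.mem_pyRange_one).mp ht
        have h1 : fA f t (j - i) = (bBuild c (j-i)).getD (t, j - i) [] := by
          apply ih (j - i) (by omega) f t (by omega) (by omega)
        rw [h1]
        rw [bBuild_getD c hc ((j-i).toNat) (j-i) le_rfl,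
            bBuild_getD c hc ((j-1).toNat) (j-1) le_rfl]
        rw [if_pos (by omega), if_pos (by omega)]
      · rw [if_neg (by omega)]
        show (if i = j then [[j]] else if i < j then _ else _) = _
        rw [if_neg hij, if_neg hlt]

-- ===== VERDICT (by name: the statement is the Claim_ definition above) =====
theorem nondecreasingPartitionsStartingWith_spec :
    Claim_equal_nondecreasingPartitionsStartingWith := by
  intro k n _hdom hpre
  unfold Spec_nondecreasingPartitionsStartingWith
  unfold nondecreasingPartitionsStartingWith nondecreasingPartitionsStartingWith_alt
  by_cases hkn : k = n
  · subst hkn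
    rw [if_pos rfl]
    show (if k = k then [[k]] else _) = _
    rw [if_pos rfl]
  · rw [if_neg hkn]
    by_cases hlt : k < n
    · have hk1 : 1 ≤ k := hpre hlt
      have hge : ¬ (k ≥ n ∨ k < 1) := by omega
      rw [if_neg hge]
      have hfuel : ∃ f, n.toNat + 1 = f + 1 := ⟨n.toNat, rfl⟩
      rw [fA_flat n.toNat k n hlt]
      apply List.flatMap_congr
      intro i hi
      have hir := (PySem.List.mem_pyRange_one).mp hi
      congr 1
      exact fA_eq_table k hk1 ((n-k).toNat) (n-k) le_rfl n.toNat i (by omega) (by omega)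
    · have hge : (k ≥ n ∨ k < 1) := by omega
      rw [if_pos hge]
      show (if k = n then [[n]] else if k < n then _ else _) = _
      rw [if_neg hkn, if_neg hlt]
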